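-- pv_equiv track=rewrite | github.com/goncrust/SchoolProjects | LEIC-A/FP/proj1/main.py | validar_cifra
-- ===== SOURCE A (Python) =====
-- def primeiro_no_alfabeto(c1, c2):
--     """Verifica se c1 aparece primeiro no alfabeto em relação a c2
--
--     Devolve True se c1 (string com apenas um carater) aparece primeiro no alfabeto
--     em relação a c2 (string com apenas um carater). Devolve False caso contrário.
--     (cad. carateres x cad. carateres --> booleano)
--     """
--
--     alfabeto = ('a', 'b', 'c', 'd', 'e', 'f', 'g', 'h', 'i', 'j', 'k', 'l', 'm', 'n',
--             'o', 'p', 'q', 'r', 's', 't', 'u', 'v', 'w', 'x', 'y', 'z')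
--
--     for l in alfabeto:
--         if l == c1:
--             return True
--         elif l == c2:
--             return False
--
-- def validar_cifra(cifra, sc):
--     """Verifica se a sequencia de controlo é coerente com a cifra
--
--     Recebe uma cifra (string) e uma sequencia de controlo (string) e devolve True
--     se e só se a sequencia de controlo é coerente com a cifra, caso contrario devolve False.
--     Para a sequencia de controlo ser coerente com a cifra, a mesma deve ser formada pelas
--     cinco letras mais comuns na cifra, por ordem inversa de ocorrencias, com empates decididos
--     por ordem alfabética.
--     (cad. carateres x cad. carateres --> booleano)
--     """
--
--     def sort_ocorrencias(lista):
--         """Ordena a lista de ocorrencias de letras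
--
--         Ordena a lista (argumento) que contem listas que represetam a ocorrencia de letras
--         (i.e. [['a', 2], ['b', 3]]) por ordem inversa de ocorrencias de cada letra.
--         Caso duas letras tenham o mesmo numero de ocorrencias, o empate é decidido por
--         ordem alfabética.
--         Esta função baseia-se no algoritmo bubble sort.
--         (lista --> {})
--         """
--
--         alteracao = True
--
--         for i in range(len(lista) - 1, 0, -1):
--
--             alteracao = False
--
--             for j in range(1, i + 1):
--                 if lista[j][1] > lista[j - 1][1]:
--                     lista[j], lista[j - 1] = lista[j - 1], lista[j]
--
--                     alteracao = True
--                 elif lista[j][1] == lista[j - 1][1]: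
--                     # Se lista[j][0] primeiro no alfabeto em relacao a lista[j-1][0], entao troca
--                     if primeiro_no_alfabeto(lista[j][0], lista[j - 1][0]):
--                         lista[j], lista[j - 1] = lista[j - 1], lista[j]
--
--                         alteracao = True
--
--             if not alteracao:
--                 break
--
--     # Contar ocorrencias
--     ocorrencias = {}
--
--     for c in cifra:
--         if c == '-':
--             continue
--
--         if c not in ocorrencias:
--             ocorrencias[c] = 0
--
--         ocorrencias[c] += 1
--
--     # Colocar por ordem
--     ocorrencias = list(ocorrencias.items())
--     sort_ocorrencias(ocorrencias)
--
--     # Comparar com sequencia de controlo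
--     string_ocorrencias = "["
--     for i in range(5):
--         string_ocorrencias += ocorrencias[i][0]
--
--     string_ocorrencias += "]"
--
--     return string_ocorrencias == sc
-- ===== SOURCE B (Python) =====
-- ALFABETO = 'abcdefghijklmnopqrstuvwxyz'
--
--
-- def _rank(c):
--     """Position of c in the lowercase alphabet; 26 for any other character."""
--     return ALFABETO.index(c) if c in ALFABETO else 26
--
--
-- def validar_cifra(cifra, sc):
--     # Count occurrences, skipping '-'
--     ocorrencias = {}
--     for c in cifra:
--         if c == '-':
--             continue
--         ocorrencias[c] = ocorrencias.get(c, 0) + 1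
--
--     pool = list(ocorrencias.items())
--
--     # Repeated selection of the best remaining letter: highest count first,
--     # ties decided by alphabet position (non-letters last, keeping pool order).
--     resultado = "["
--     for _ in range(5):
--         best = pool[0]
--         for e in pool:
--             if e[1] > best[1] or (e[1] == best[1] and _rank(e[0]) < _rank(best[0])):
--                 best = e
--         resultado += best[0]
--         pool.remove(best)
--     resultado += "]"
--
--     return resultado == sc
-- ===== Notes on version B (the rewrite author's own statement) =====
-- stated objective: alternative
-- what changed: B replaces A's in-place bubble sort of all distinct letters (with repeated calls to the alphabet-scanning comparator) by five rounds of max-selection over the remaining (char,count) pool using an alphabet-rank tie-break, keeping the same counting pass and the same IndexError when fewer than 5 distinct letters exist.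
import Mathlib
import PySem

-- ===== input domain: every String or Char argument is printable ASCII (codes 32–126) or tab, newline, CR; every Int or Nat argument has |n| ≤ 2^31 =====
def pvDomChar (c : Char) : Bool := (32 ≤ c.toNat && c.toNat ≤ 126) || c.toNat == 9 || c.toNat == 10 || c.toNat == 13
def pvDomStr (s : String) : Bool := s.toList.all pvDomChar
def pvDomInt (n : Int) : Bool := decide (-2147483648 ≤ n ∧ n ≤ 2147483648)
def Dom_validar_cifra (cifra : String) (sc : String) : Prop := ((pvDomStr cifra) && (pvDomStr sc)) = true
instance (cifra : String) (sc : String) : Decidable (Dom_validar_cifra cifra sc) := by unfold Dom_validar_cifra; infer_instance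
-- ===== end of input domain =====

-- B replaces A's in-place bubble sort of all distinct letters by five rounds of
-- max-selection over the remaining pool (objective: alternative algorithm, same cost class).

-- ===== PORT A =====
def pvAlfabeto : List Char :=
  ['a','b','c','d','e','f','g','h','i','j','k','l','m',
   'n','o','p','q','r','s','t','u','v','w','x','y','z']

def pnaLoop : List Char → Char → Char → Option Bool
  | [], _, _ => none
  | l :: rest, c1, c2 =>
    if l == c1 then some true
    else if l == c2 then some false
    else pnaLoop rest c1 c2

-- Python returns None when neither char is a lowercase letter; None is falsy at the call site.
def primeiro_no_alfabeto (c1 c2 : Char) : Option Bool := pnaLoop pvAlfabeto c1 c2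

-- body of the inner `for j in range(1, i + 1)` loop of sort_ocorrencias
-- (indices j, j-1 are always in range there, so the total pyGetD/pySetD forms are exact)
def pvInnerStep (st : List (Char × Int) × Bool) (j : Int) : List (Char × Int) × Bool :=
  let lista := st.1
  let cur := PySem.List.pyGetD lista j ('a', 0)
  let prev := PySem.List.pyGetD lista (j - 1) ('a', 0)
  if cur.2 > prev.2 then
    (PySem.List.pySetD (PySem.List.pySetD lista j prev) (j - 1) cur, true)
  else if cur.2 == prev.2 then
    if primeiro_no_alfabeto cur.1 prev.1 == some true then
      (PySem.List.pySetD (PySem.List.pySetD lista j prev) (j - 1) cur, true)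
    else st
  else st

-- body of the outer `for i in range(len(lista) - 1, 0, -1)` loop; the Bool is the
-- `break` already taken (Python sets alteracao = False, runs the inner loop, breaks if still False)
def pvOuterStep (st : List (Char × Int) × Bool) (i : Int) : List (Char × Int) × Bool :=
  if st.2 then st
  else
    let inner := (PySem.List.pyRange 1 (i + 1) 1).foldl pvInnerStep (st.1, false)
    (inner.1, !inner.2)

-- Python sorts `lista` in place; the port returns the final list
def pvSortOcorrencias (lista : List (Char × Int)) : List (Char × Int) :=
  ((PySem.List.pyRange (PySem.List.len lista - 1) 0 (-1)).foldl pvOuterStep (lista, false)).1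

def pvContar (cs : List Char) : PySem.Dict Char Int :=
  cs.foldl (fun d c =>
    if c == '-' then d
    else
      let d1 := if d.contains c then d else d.insert c (0 : Int)
      d1.modify c 0 (· + 1)) PySem.Dict.empty

def validar_cifra (cifra : String) (sc : String) : Bool :=
  let ocorrencias := (pvContar cifra.toList).items
  let lista := pvSortOcorrencias ocorrencias
  let chars? := (PySem.List.pyRange 0 5 1).foldl
    (fun (acc : Option (List Char)) i =>
      match acc, PySem.List.pyGet? lista i with
      | some cs, some p => some (cs ++ [p.1])
      | _, _ => none) (some ['['])
  match chars? with
  | some cs => decide (cs ++ [']'] = sc.toList)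
  | none => false  -- Python raises IndexError here (fewer than 5 distinct letters); excluded by Pre_

-- ===== PORT B =====
def pvAlfabetoB : List Char :=
  ['a','b','c','d','e','f','g','h','i','j','k','l','m',
   'n','o','p','q','r','s','t','u','v','w','x','y','z']

-- rank of a char in the alphabet: ALFABETO.index(c) if c in ALFABETO else 26
def pvRank (c : Char) : Nat :=
  if pvAlfabetoB.contains c then pvAlfabetoB.idxOf c else 26

def pvBetter (e best : Char × Int) : Bool :=
  decide (e.2 > best.2) || ((e.2 == best.2) && decide (pvRank e.1 < pvRank best.1))

-- five rounds of `best = pool[0]; scan; resultado += best[0]; pool.remove(best)`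
def pvSelect (pool : List (Char × Int)) : Nat → Option (List Char)
  | 0 => some []
  | n + 1 =>
    match pool with
    | [] => none  -- pool[0] raises IndexError in Python; excluded by Pre_
    | p0 :: _ =>
      let best := pool.foldl (fun b e => if pvBetter e b then e else b) p0
      match PySem.List.remove? pool best with
      | some pool' => (pvSelect pool' n).map (fun cs => best.1 :: cs)
      | none => none  -- unreachable: best ∈ pool

def validar_cifra_alt (cifra : String) (sc : String) : Bool :=
  let ocorrencias := cifra.toList.foldl (fun d c =>
      if c == '-' then d else d.insert c (d.getD c 0 + 1)) PySem.Dict.empty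
  match pvSelect ocorrencias.items 5 with
  | some cs => decide (('[' :: cs) ++ [']'] = sc.toList)
  | none => false

-- ===== PRECONDITION & SPEC =====
-- Pre_ excludes exactly the inputs where A raises IndexError: fewer than 5 distinct non-'-' characters in cifra.
def Pre_validar_cifra (cifra : String) (sc : String) : Prop :=
  5 ≤ (PySem.Set.ofList (cifra.toList.filter (fun c => c != '-'))).length
instance (cifra : String) (sc : String) : Decidable (Pre_validar_cifra cifra sc) := by
  unfold Pre_validar_cifra; infer_instance

def pvWitness_validar_cifra : String × String := ("abcde", "[abcde]")

def Spec_validar_cifra (cifra : String) (sc : String) (out : Bool) : Prop := out = validar_cifra_alt cifra sc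
instance (cifra : String) (sc : String) (out : Bool) : Decidable (Spec_validar_cifra cifra sc out) := by
  unfold Spec_validar_cifra; infer_instance

-- ===== CLAIM (what is proved, stated in full; the proofs are below) =====
def Claim_equal_validar_cifra : Prop := ∀ (cifra : String) (sc : String), Dom_validar_cifra cifra sc → Pre_validar_cifra cifra sc → Spec_validar_cifra cifra sc (validar_cifra cifra sc)

-- ===== LEMMAS AND PROOFS =====

-- the comparison order: x strictly precedes y (more occurrences, or tie and earlier alphabet rank)
def pvRnk (c : Char) : Nat := pvAlfabeto.idxOf c

def bLT (x y : Char × Int) : Bool :=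
  decide (y.2 < x.2) || ((y.2 == x.2) && decide (pvRnk x.1 < pvRnk y.1))

def pvSame (x y : Char × Int) : Prop := x.2 = y.2 ∧ pvRnk x.1 = pvRnk y.1

def pvLe (x y : Char × Int) : Prop := bLT x y = true ∨ pvSame x y

def pclB (z w : Char × Int) : Bool := (w.2 == z.2) && (pvRnk w.1 == pvRnk z.1)

-- a predicate that never holds of both members of a strictly ordered pair (class predicates qualify)
def pvCond (p : Char × Int → Bool) : Prop :=
  ∀ x y, bLT y x = true → ¬(p x = true ∧ p y = true)

lemma bLT_iff (x y : Char × Int) :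
    bLT x y = true ↔ y.2 < x.2 ∨ (y.2 = x.2 ∧ pvRnk x.1 < pvRnk y.1) := by
  simp [bLT]

lemma bLT_irrefl (x : Char × Int) : bLT x x = false := by
  simp [bLT]

lemma not_same_of_bLT {x y : Char × Int} (h : bLT x y = true) : ¬ pvSame x y := by
  rw [bLT_iff] at h; intro hs; unfold pvSame at hs; rcases h with h | h <;> omega

lemma pvSame_refl (x : Char × Int) : pvSame x x := ⟨rfl, rfl⟩

lemma pvSame_symm {x y : Char × Int} (h : pvSame x y) : pvSame y x := ⟨h.1.symm, h.2.symm⟩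

lemma pvSame_trans {x y z : Char × Int} (h1 : pvSame x y) (h2 : pvSame y z) : pvSame x z :=
  ⟨h1.1.trans h2.1, h1.2.trans h2.2⟩

lemma pvLe_refl (x : Char × Int) : pvLe x x := Or.inr (pvSame_refl x)

lemma pvLe_trans {x y z : Char × Int} (h1 : pvLe x y) (h2 : pvLe y z) : pvLe x z := by
  rcases h1 with h1 | h1 <;> rcases h2 with h2 | h2
  · exact Or.inl (by rw [bLT_iff] at *; rcases h1 with a|a <;> rcases h2 with b|b <;> [left;left;left;right] <;> omega)
  · exact Or.inl (by rw [bLT_iff] at *; unfold pvSame at h2; rcases h1 with a|a <;> [left;right] <;> omega)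
  · exact Or.inl (by rw [bLT_iff] at *; unfold pvSame at h1; rcases h2 with a|a <;> [left;right] <;> omega)
  · exact Or.inr (pvSame_trans h1 h2)

lemma bLT_of_bLT_le {x y z : Char × Int} (h1 : bLT x y = true) (h2 : pvLe y z) : bLT x z = true := by
  rcases h2 with h2 | h2
  · rw [bLT_iff] at *; rcases h1 with a|a <;> rcases h2 with b|b <;> [left;left;left;right] <;> omega
  · rw [bLT_iff] at *; unfold pvSame at h2; rcases h1 with a|a <;> [left;right] <;> omega

lemma pvLe_of_not_bLT {x y : Char × Int} (h : bLT y x = false) : pvLe x y := by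
  have h1 : ¬ (x.2 < y.2 ∨ (x.2 = y.2 ∧ pvRnk y.1 < pvRnk x.1)) := by
    rw [← bLT_iff]; simp [h]
  by_cases h2 : bLT x y = true
  · exact Or.inl h2
  · have h3 : ¬ (y.2 < x.2 ∨ (y.2 = x.2 ∧ pvRnk x.1 < pvRnk y.1)) := by
      rw [← bLT_iff]; simpa using h2
    push Not at h1 h3
    exact Or.inr ⟨by omega, by omega⟩

lemma pvLe_of_bLT {x y : Char × Int} (h : bLT x y = true) : pvLe x y := Or.inl h

lemma pclB_iff (z w : Char × Int) : pclB z w = true ↔ pvSame w z := by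
  simp [pclB, pvSame]

-- ---- the primeiro_no_alfabeto loop decides alphabet rank ----

lemma pnaLoop_eq (l : List Char) (c1 c2 : Char) (h : c1 ≠ c2) :
    (pnaLoop l c1 c2 == some true) = decide (l.idxOf c1 < l.idxOf c2) := by
  induction l with
  | nil => simp [pnaLoop]
  | cons x rest ih =>
    by_cases h1 : x = c1
    · subst h1
      have h2 : x ≠ c2 := h
      rw [pnaLoop]
      simp [List.idxOf_cons_self, List.idxOf_cons_ne _ h2]
    · by_cases h2 : x = c2
      · subst h2
        rw [pnaLoop]
        simp [List.idxOf_cons_self, List.idxOf_cons_ne _ h1,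
          show (x == c1) = false by simpa using h1]
      · rw [pnaLoop]
        simp only [show (x == c1) = false by simpa using h1,
          show (x == c2) = false by simpa using h2,
          List.idxOf_cons_ne _ h1, List.idxOf_cons_ne _ h2]
        · simpa using ih

lemma pvPrimeiro_eq (c1 c2 : Char) (h : c1 ≠ c2) :
    (primeiro_no_alfabeto c1 c2 == some true) = decide (pvRnk c1 < pvRnk c2) :=
  pnaLoop_eq pvAlfabeto c1 c2 h

lemma pvRank_eq_rnk (c : Char) : pvRank c = pvRnk c := by
  unfold pvRank pvRnk
  rw [show pvAlfabetoB = pvAlfabeto from rfl]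
  by_cases h : c ∈ pvAlfabeto
  · simp [List.contains_iff_mem, h]
  · simp [List.contains_iff_mem, h, List.idxOf_eq_length h]
    rfl

lemma pvBetter_eq (e b : Char × Int) : pvBetter e b = bLT e b := by
  by_cases h : e.2 = b.2
  · simp [pvBetter, bLT, pvRank_eq_rnk, h, gt_iff_lt]
  · have h2 : ¬ b.2 = e.2 := fun h' => h h'.symm
    simp only [pvBetter, bLT, pvRank_eq_rnk, gt_iff_lt,
      show (e.2 == b.2) = false by simpa using h,
      show (b.2 == e.2) = false by simpa using h2]

-- ---- one bubble pass, structurally ----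

def pass1 : List (Char × Int) → List (Char × Int) × Bool
  | [] => ([], false)
  | [x] => ([x], false)
  | x :: y :: t =>
    if bLT y x then
      (y :: (pass1 (x :: t)).1, true)
    else
      (x :: (pass1 (y :: t)).1, (pass1 (y :: t)).2)
termination_by l => l.length
decreasing_by all_goals simp

def sinkf (a : Char × Int) (t : List (Char × Int)) : Char × Int :=
  t.foldl (fun cur y => if bLT y cur then cur else y) a

lemma pass1_length (l : List (Char × Int)) : (pass1 l).1.length = l.length := by
  fun_induction pass1 l <;> simp_all

lemma pass1_perm (l : List (Char × Int)) : (pass1 l).1.Perm l := by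
  fun_induction pass1 l with
  | case1 => rfl
  | case2 x => rfl
  | case3 x y t h ih =>
    exact (ih.cons y).trans (List.Perm.swap x y t)
  | case4 x y t h ih => exact ih.cons x

lemma pass1_filter (p : Char × Int → Bool) (hp : pvCond p) (l : List (Char × Int)) :
    (pass1 l).1.filter p = l.filter p := by
  fun_induction pass1 l with
  | case1 => rfl
  | case2 x => rfl
  | case3 x y t h ih =>
    have hxy := hp x y h
    by_cases hx : p x = true
    · have hy : p y = false := by
        cases hpy : p y
        · rfl
        · exact absurd ⟨hx, hpy⟩ hxy
      simp [List.filter_cons, hx, hy, ih]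
    · have hx' : p x = false := by simpa using hx
      simp [List.filter_cons, hx', ih]
  | case4 x y t h ih =>
    simp [List.filter_cons, ih]

lemma sink_decomp (t : List (Char × Int)) (a : Char × Int) :
    ∃ ys, (pass1 (a :: t)).1 = ys ++ [sinkf a t] := by
  induction t generalizing a with
  | nil => exact ⟨[], by simp [pass1, sinkf]⟩
  | cons y t' ih =>
    rw [pass1]
    by_cases h : bLT y a = true
    · obtain ⟨ys, hys⟩ := ih a
      refine ⟨y :: ys, ?_⟩
      rw [sinkf, List.foldl_cons]
      simp only [h, if_true]
      simpa using hys
    · have h' : bLT y a = false := by simpa using h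
      obtain ⟨ys, hys⟩ := ih y
      refine ⟨a :: ys, ?_⟩
      rw [sinkf, List.foldl_cons]
      simp only [h', if_false, Bool.false_eq_true]
      simpa using hys

lemma sink_mem (t : List (Char × Int)) (a : Char × Int) : sinkf a t ∈ a :: t := by
  induction t generalizing a with
  | nil => simp [sinkf]
  | cons y t' ih =>
    rw [sinkf, List.foldl_cons]
    by_cases h : bLT y a = true
    · simp only [h, if_true]
      have h2 := ih a
      show sinkf a t' ∈ a :: y :: t'
      simp only [List.mem_cons] at h2 ⊢
      tauto
    · have h' : bLT y a = false := by simpa using h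
      simp only [h', if_false, Bool.false_eq_true]
      have h2 := ih y
      show sinkf y t' ∈ a :: y :: t'
      simp only [List.mem_cons] at h2 ⊢
      tauto

lemma sink_le (t : List (Char × Int)) (a : Char × Int) :
    ∀ x ∈ a :: t, pvLe x (sinkf a t) := by
  induction t generalizing a with
  | nil => intro x hx; simp at hx; subst hx; exact pvLe_refl x
  | cons y t' ih =>
    intro x hx
    rw [sinkf, List.foldl_cons]
    rcases List.mem_cons.mp hx with he | hx2
    · subst he
      by_cases h : bLT y x = true
      · simp only [h, if_true]; exact ih x x (by simp)
      · have h' : bLT y x = false := by simpa using h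
        simp only [h', if_false, Bool.false_eq_true]
        exact pvLe_trans (pvLe_of_not_bLT h') (ih y y (by simp))
    · rcases List.mem_cons.mp hx2 with he | hx3
      · subst he
        by_cases h : bLT x a = true
        · simp only [h, if_true]
          exact pvLe_trans (pvLe_of_bLT h) (ih a a (by simp))
        · have h' : bLT x a = false := by simpa using h
          simp only [h', if_false, Bool.false_eq_true]
          exact ih x x (by simp)
      · by_cases h : bLT y a = true
        · simp only [h, if_true]; exact ih a x (by simp [hx3])
        · have h' : bLT y a = false := by simpa using h
          simp only [h', if_false, Bool.false_eq_true]
          exact ih y x (by simp [hx3])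

lemma pass1_flag_false (l : List (Char × Int)) (h : (pass1 l).2 = false) :
    (pass1 l).1 = l ∧ l.Pairwise pvLe := by
  fun_induction pass1 l with
  | case1 => simp
  | case2 x => simp
  | case3 x y t hb ih => simp at h
  | case4 x y t hb ih =>
    simp only at h
    obtain ⟨h1, h2⟩ := ih h
    refine ⟨by simp [h1], ?_⟩
    have hxy : pvLe x y := pvLe_of_not_bLT (by simpa using hb)
    refine List.Pairwise.cons ?_ h2
    intro z hz
    rcases List.mem_cons.mp hz with he | hz2
    · subst he; exact hxy
    · exact pvLe_trans hxy (List.rel_of_pairwise_cons h2 hz2)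

lemma pass1_snoc (t : List (Char × Int)) (a c : Char × Int) :
    pass1 ((a :: t) ++ [c]) =
      ((pass1 (a :: t)).1.dropLast ++
        (if bLT c (sinkf a t) then [c, sinkf a t] else [sinkf a t, c]),
       (pass1 (a :: t)).2 || bLT c (sinkf a t)) := by
  induction t generalizing a with
  | nil => by_cases h : bLT c a = true <;> simp [pass1, sinkf, h]
  | cons y t'' ih =>
    have hP : (pass1 (a :: t'')).1 ≠ [] := by
      have hl := pass1_length (a :: t'')
      intro hh; rw [hh] at hl; simp at hl
    by_cases h : bLT y a = true
    · have hs : sinkf a (y :: t'') = sinkf a t'' := by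
        rw [sinkf, List.foldl_cons]; simp [h, sinkf]
      show pass1 (a :: y :: (t'' ++ [c])) = _
      rw [pass1]
      simp only [h, if_true]
      have ih' := ih a
      rw [show a :: (t'' ++ [c]) = (a :: t'') ++ [c] from rfl, ih']
      rw [pass1]
      simp only [h, if_true, hs]
      simp [List.dropLast_cons_of_ne_nil hP]
    · have h' : bLT y a = false := by simpa using h
      have hs : sinkf a (y :: t'') = sinkf y t'' := by
        rw [sinkf, List.foldl_cons]; simp [h', sinkf]
      show pass1 (a :: y :: (t'' ++ [c])) = _
      rw [pass1]
      simp only [h', if_false, Bool.false_eq_true]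
      have ih' := ih y
      rw [show y :: (t'' ++ [c]) = (y :: t'') ++ [c] from rfl, ih']
      rw [pass1]
      simp only [h', if_false, Bool.false_eq_true, hs]
      have hPy : (pass1 (y :: t'')).1 ≠ [] := by
        have hl := pass1_length (y :: t'')
        intro hh; rw [hh] at hl; simp at hl
      simp [List.dropLast_cons_of_ne_nil hPy]

-- ---- the indexed inner loop is pass1 on the prefix ----

lemma step_shape (ys : List (Char × Int)) (m c : Char × Int) (rest : List (Char × Int))
    (b : Bool) (i : Nat) (hy : ys.length = i) (hne : c.1 ≠ m.1) :
    pvInnerStep (ys ++ m :: c :: rest, b) ((i : Int) + 1)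
      = if bLT c m then (ys ++ c :: m :: rest, true) else (ys ++ m :: c :: rest, b) := by
  subst hy
  have hj1 : ((ys.length : Int) + 1) = ((ys.length + 1 : Nat) : Int) := by omega
  have hj0 : ((ys.length : Int) + 1 - 1) = ((ys.length : Nat) : Int) := by omega
  have hcur : PySem.List.pyGetD (ys ++ m :: c :: rest) ((ys.length : Int) + 1) ('a', 0) = c := by
    rw [hj1, PySem.List.pyGetD_natCast, List.getD_eq_getElem?_getD,
      List.getElem?_append_right (by omega)]
    simp
  have hprev : PySem.List.pyGetD (ys ++ m :: c :: rest) ((ys.length : Int) + 1 - 1) ('a', 0) = m := by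
    rw [hj0, PySem.List.pyGetD_natCast, List.getD_eq_getElem?_getD,
      List.getElem?_append_right (by omega)]
    simp
  have hset : PySem.List.pySetD (PySem.List.pySetD (ys ++ m :: c :: rest)
      ((ys.length : Int) + 1) m) ((ys.length : Int) + 1 - 1) c = ys ++ c :: m :: rest := by
    rw [hj0, hj1, PySem.List.pySetD_natCast, PySem.List.pySetD_natCast]
    rw [List.set_append, if_neg (by omega), List.set_append, if_neg (by omega)]
    simp
  rw [pvInnerStep]
  simp only [hcur, hprev, hset]
  by_cases h1 : m.2 < c.2
  · rw [if_pos (by exact h1), if_pos (by rw [bLT_iff]; exact Or.inl h1)]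
  · rw [if_neg (by exact h1)]
    by_cases h2 : c.2 = m.2
    · rw [if_pos (by simpa using h2)]
      rw [pvPrimeiro_eq c.1 m.1 hne]
      by_cases h3 : pvRnk c.1 < pvRnk m.1
      · rw [if_pos (by simpa using h3), if_pos (by rw [bLT_iff]; exact Or.inr ⟨h2.symm, h3⟩)]
      · rw [if_neg (by simpa using h3), if_neg (by rw [bLT_iff]; push Not; exact ⟨by omega, fun _ => by omega⟩)]
    · rw [if_neg (by simpa using h2), if_neg (by rw [bLT_iff]; push Not; exact ⟨by omega, fun hh => absurd hh.symm h2⟩)]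

lemma inner_eq (i : Nat) (l : List (Char × Int)) (hnd : (l.map Prod.fst).Nodup)
    (hi : i < l.length) :
    (PySem.List.pyRange 1 ((i : Int) + 1) 1).foldl pvInnerStep (l, false)
      = ((pass1 (l.take (i + 1))).1 ++ l.drop (i + 1), (pass1 (l.take (i + 1))).2) := by
  induction i with
  | zero =>
    rw [show ((0 : Nat) : Int) + 1 = 1 by norm_num, PySem.List.pyRange_one_eq_nil (le_refl 1)]
    obtain ⟨a, t, rfl⟩ : ∃ a t, l = a :: t := by
      cases l with
      | nil => simp at hi
      | cons a t => exact ⟨a, t, rfl⟩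
    simp [pass1]
  | succ i ih =>
    have hi' : i < l.length := by omega
    rw [show ((i + 1 : Nat) : Int) + 1 = ((i : Int) + 1) + 1 by push_cast; ring,
      PySem.List.pyRange_one_succ_right (by omega : (1 : Int) ≤ (i : Int) + 1),
      List.foldl_append, ih hi']
    obtain ⟨a, t, hT⟩ : ∃ a t, l.take (i + 1) = a :: t := by
      cases hT : l.take (i + 1) with
      | nil => exfalso; have := List.length_take (i := i + 1) (l := l); rw [hT] at this; simp at this; omega
      | cons a t => exact ⟨a, t, rfl⟩
    obtain ⟨ys, hys⟩ := sink_decomp t a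
    have hlen : ys.length = i := by
      have h1 := pass1_length (a :: t)
      have h2 : (a :: t).length = i + 1 := by
        rw [← hT]; simp [List.length_take]; omega
      rw [hys] at h1; rw [h2] at h1; simp at h1; omega
    have hdrop : l.drop (i + 1) = l[i + 1] :: l.drop (i + 2) := List.drop_eq_getElem_cons hi
    have hne : l[i + 1].1 ≠ (sinkf a t).1 := by
      have hsplit : l = l.take (i + 1) ++ l.drop (i + 1) := (List.take_append_drop _ _).symm
      have hnd' : (l.take (i + 1) ++ l.drop (i + 1)).map Prod.fst |>.Nodup := by rw [← hsplit]; exact hnd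
      rw [List.map_append, List.nodup_append] at hnd'
      have hm : sinkf a t ∈ l.take (i + 1) := by rw [hT]; exact sink_mem t a
      have hc : l[i + 1] ∈ l.drop (i + 1) := by rw [hdrop]; exact List.mem_cons_self
      exact fun he => (hnd'.2.2 (sinkf a t).1 (List.mem_map_of_mem hm) l[i + 1].1 (List.mem_map_of_mem hc)) he.symm
    have hstate : (pass1 (l.take (i + 1))).1 ++ l.drop (i + 1)
        = ys ++ (sinkf a t) :: l[i + 1] :: l.drop (i + 2) := by
      rw [hT, hys, hdrop]; simp
    rw [hstate]
    simp only [List.foldl_cons, List.foldl_nil]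
    rw [step_shape ys (sinkf a t) l[i + 1] (l.drop (i + 2)) _ i hlen hne]
    have hT2 : l.take (i + 2) = (a :: t) ++ [l[i + 1]] := by
      rw [show i + 2 = (i + 1) + 1 from rfl, List.take_succ_eq_append_getElem hi, hT]
    rw [hT2, pass1_snoc t a l[i + 1], hys, List.dropLast_concat]
    by_cases h : bLT l[i + 1] (sinkf a t) = true
    · rw [if_pos h]
      simp only [h, Bool.or_true]
      simp
    · have h' : bLT l[i + 1] (sinkf a t) = false := by simpa using h
      rw [if_neg (by simp [h'])]
      simp only [h', Bool.or_false]
      rw [hT]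
      simp

-- ---- the outer loop sorts ----

lemma outer_broke (r : List Int) (l : List (Char × Int)) :
    r.foldl pvOuterStep (l, true) = (l, true) := by
  induction r with
  | nil => rfl
  | cons i r ih => rw [List.foldl_cons, pvOuterStep]; simpa using ih

lemma outer_spec (i : Nat) (l pool : List (Char × Int))
    (hnd : (pool.map Prod.fst).Nodup) (hperm : l.Perm pool)
    (hfil : ∀ p, pvCond p → l.filter p = pool.filter p)
    (hsuf : (l.drop (i + 1)).Pairwise pvLe)
    (hbd : ∀ x ∈ l.take (i + 1), ∀ y ∈ l.drop (i + 1), pvLe x y)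
    (hi : i < l.length) :
    (((PySem.List.pyRange (i : Int) 0 (-1)).foldl pvOuterStep (l, false)).1.Perm pool) ∧
    (((PySem.List.pyRange (i : Int) 0 (-1)).foldl pvOuterStep (l, false)).1.Pairwise pvLe) ∧
    (∀ p, pvCond p →
      ((PySem.List.pyRange (i : Int) 0 (-1)).foldl pvOuterStep (l, false)).1.filter p = pool.filter p) := by
  induction i generalizing l with
  | zero =>
    rw [show ((0 : Nat) : Int) = 0 from rfl, PySem.List.pyRange_neg_one_eq_nil (le_refl 0)]
    refine ⟨hperm, ?_, hfil⟩
    obtain ⟨a, t, rfl⟩ : ∃ a t, l = a :: t := by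
      cases l with
      | nil => simp at hi
      | cons a t => exact ⟨a, t, rfl⟩
    refine List.Pairwise.cons ?_ ?_
    · intro y hy
      exact hbd a (by simp) y (by simpa using hy)
    · simpa using hsuf
  | succ i ih =>
    have hndl : (l.map Prod.fst).Nodup := ((hperm.map Prod.fst).nodup_iff).mpr hnd
    rw [PySem.List.pyRange_neg_one_cons (by positivity : (0 : Int) < ((i + 1 : Nat) : Int)),
      List.foldl_cons]
    rw [show ((i + 1 : Nat) : Int) - 1 = ((i : Nat) : Int) by push_cast; ring]
    rw [pvOuterStep]
    simp only [if_false, Bool.false_eq_true]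
    rw [inner_eq (i + 1) l hndl hi]
    obtain ⟨a, t, hT⟩ : ∃ a t, l.take (i + 2) = a :: t := by
      cases hT : l.take (i + 2) with
      | nil =>
        exfalso
        have := List.length_take (i := i + 2) (l := l); rw [hT] at this; simp at this; omega
      | cons a t => exact ⟨a, t, rfl⟩
    obtain ⟨ys, hys⟩ := sink_decomp t a
    have hlen2 : (a :: t).length = i + 2 := by
      rw [← hT]; simp [List.length_take]; omega
    have hlen : ys.length = i + 1 := by
      have h1 := pass1_length (a :: t)
      rw [hys, hlen2] at h1; simp at h1; omega
    have hperm' : (pass1 (l.take (i + 2))).1.Perm (l.take (i + 2)) := pass1_perm _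
    have hm : sinkf a t ∈ l.take (i + 2) := by rw [hT]; exact sink_mem t a
    cases hf : (pass1 (l.take (i + 2))).2 with
    | true =>
      simp only [Bool.not_true]
      set l' := (pass1 (l.take (i + 2))).1 ++ l.drop (i + 2) with hl'
      have hpl'l : l'.Perm l := by
        have h1 : l'.Perm (l.take (i + 2) ++ l.drop (i + 2)) :=
          hperm'.append_right (l.drop (i + 2))
        rwa [List.take_append_drop] at h1
      have hfl' : ∀ p, pvCond p → l'.filter p = pool.filter p := by
        intro p hp
        rw [hl', List.filter_append, pass1_filter p hp, ← List.filter_append,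
          List.take_append_drop]
        exact hfil p hp
      have hP1 : (pass1 (l.take (i + 2))).1 = ys ++ [sinkf a t] := by rw [hT]; exact hys
      have hdl' : l'.drop (i + 1) = sinkf a t :: l.drop (i + 2) := by
        rw [hl', hP1, List.drop_append_of_le_length (by simp [hlen]),
          List.drop_append_of_le_length (by omega), List.drop_of_length_le (by omega)]
        simp [hlen]
      have htl' : l'.take (i + 1) = ys := by
        rw [hl', hP1, List.append_assoc, List.take_append_of_le_length (by omega),
          List.take_of_length_le (by omega)]
      refine ih l' (hpl'l.trans hperm) hfl' ?_ ?_ ?_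
      · rw [hdl']
        refine List.Pairwise.cons ?_ hsuf
        intro y hy
        exact hbd (sinkf a t) hm y hy
      · intro x hx y hy
        rw [htl'] at hx
        have hxT : x ∈ l.take (i + 2) := by
          have hx2 : x ∈ (pass1 (l.take (i + 2))).1 := by
            rw [hP1]; exact List.mem_append_left _ hx
          exact hperm'.subset hx2
        rw [hdl'] at hy
        rcases List.mem_cons.mp hy with he | hy2
        · subst he
          have hxat : x ∈ a :: t := by rwa [hT] at hxT
          exact sink_le t a x hxat
        · exact hbd x hxT y hy2
      · have hll : l'.length = l.length := hpl'l.length_eq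
        omega
    | false =>
      simp only [Bool.not_false]
      have hpf := pass1_flag_false _ hf
      have hl' : (pass1 (l.take (i + 2))).1 ++ l.drop (i + 2) = l := by
        rw [hpf.1, List.take_append_drop]
      rw [hl', outer_broke]
      refine ⟨hperm, ?_, hfil⟩
      have : l.take (i + 2) ++ l.drop (i + 2) = l := List.take_append_drop _ _
      rw [← this]
      rw [List.pairwise_append]
      exact ⟨hpf.2, hsuf, hbd⟩

lemma sort_result (pool : List (Char × Int)) (hnd : (pool.map Prod.fst).Nodup) :
    (pvSortOcorrencias pool).Perm pool ∧ (pvSortOcorrencias pool).Pairwise pvLe ∧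
    ∀ p, pvCond p → (pvSortOcorrencias pool).filter p = pool.filter p := by
  unfold pvSortOcorrencias
  cases hp : pool with
  | nil =>
    rw [show PySem.List.len ([] : List (Char × Int)) - 1 = -1 by simp [PySem.List.len],
      PySem.List.pyRange_neg_one_eq_nil (by omega)]
    simp
  | cons p0 rest =>
    rw [show PySem.List.len (p0 :: rest) - 1 = ((rest.length : Nat) : Int) by
      simp [PySem.List.len_eq]]
    rw [← hp]
    have h := outer_spec rest.length pool pool hnd (List.Perm.refl pool)
      (fun p _ => rfl) ?_ ?_ ?_
    · exact h
    · have : pool.drop (rest.length + 1) = [] := by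
        apply List.drop_of_length_le; rw [hp]; simp
      rw [this]; exact List.Pairwise.nil
    · intro x hx y hy
      have : pool.drop (rest.length + 1) = [] := by
        apply List.drop_of_length_le; rw [hp]; simp
      rw [this] at hy; simp at hy
    · rw [hp]; simp

-- ---- selection picks the sorted head ----

lemma pickFold_go (t : List (Char × Int)) :
    ∀ (b : Char × Int) (pre1 pre2 : List (Char × Int)),
    (∀ w ∈ pre1, bLT b w = true) → (∀ w ∈ pre1 ++ b :: pre2, pvLe b w) →
    ∃ q1 q2,
      q1 ++ (t.foldl (fun b e => if pvBetter e b then e else b) b) :: q2 = pre1 ++ b :: pre2 ++ t ∧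
      (∀ w ∈ q1, bLT (t.foldl (fun b e => if pvBetter e b then e else b) b) w = true) ∧
      (∀ w ∈ pre1 ++ b :: pre2 ++ t, pvLe (t.foldl (fun b e => if pvBetter e b then e else b) b) w) := by
  induction t with
  | nil =>
    intro b pre1 pre2 h1 h2
    exact ⟨pre1, pre2, by simp, h1, by simpa using h2⟩
  | cons e t' ih =>
    intro b pre1 pre2 h1 h2
    rw [List.foldl_cons]
    by_cases he : bLT e b = true
    · rw [show (if pvBetter e b then e else b) = e by rw [pvBetter_eq, he, if_pos rfl]]
      obtain ⟨q1, q2, heq, hd1, hd2⟩ := ih e (pre1 ++ b :: pre2) []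
        (by
          intro w hw
          exact bLT_of_bLT_le he (h2 w hw))
        (by
          intro w hw
          rcases List.mem_append.mp hw with hw1 | hw2
          · exact pvLe_of_bLT (bLT_of_bLT_le he (h2 w hw1))
          · rcases List.mem_cons.mp hw2 with rfl | hw3
            · exact pvLe_refl w
            · simp at hw3)
      refine ⟨q1, q2, ?_, hd1, ?_⟩
      · rw [heq]; simp
      · intro w hw
        apply hd2
        simp only [List.mem_append, List.mem_cons] at hw ⊢
        tauto
    · have he' : bLT e b = false := by simpa using he
      rw [show (if pvBetter e b then e else b) = b by rw [pvBetter_eq, he']; simp]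
      obtain ⟨q1, q2, heq, hd1, hd2⟩ := ih b pre1 (pre2 ++ [e]) h1
        (by
          intro w hw
          simp only [List.mem_append, List.mem_cons] at hw
          rcases hw with hw1 | hw2 | hw3 | hw4
          · exact h2 w (by simp [hw1])
          · exact h2 w (by simp [hw2])
          · exact h2 w (by simp [hw3])
          · simp at hw4; subst hw4; exact pvLe_of_not_bLT he')
      refine ⟨q1, q2, ?_, hd1, ?_⟩
      · rw [heq]; simp
      · intro w hw
        apply hd2
        simp only [List.mem_append, List.mem_cons] at hw ⊢
        tauto

lemma pick_eq (S' : List (Char × Int)) (s0 p0 : Char × Int) (rest : List (Char × Int))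
    (hperm : (s0 :: S').Perm (p0 :: rest)) (hpw : (s0 :: S').Pairwise pvLe)
    (hfil : ∀ z, (s0 :: S').filter (pclB z) = (p0 :: rest).filter (pclB z)) :
    ∃ q1 q2, p0 :: rest = q1 ++ s0 :: q2 ∧ (∀ w ∈ q1, bLT s0 w = true) ∧
      (p0 :: rest).foldl (fun b e => if pvBetter e b then e else b) p0 = s0 := by
  have hstep0 : (p0 :: rest).foldl (fun b e => if pvBetter e b then e else b) p0
      = rest.foldl (fun b e => if pvBetter e b then e else b) p0 := by
    rw [List.foldl_cons, ite_self]
  obtain ⟨q1, q2, heq, hd1, hd2⟩ := pickFold_go rest p0 [] []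
    (by intro w hw; simp at hw)
    (by
      intro w hw
      simp only [List.nil_append, List.mem_cons] at hw
      rcases hw with rfl | hw2
      · exact pvLe_refl w
      · simp at hw2)
  simp only [List.nil_append, List.singleton_append] at heq hd2
  set z := rest.foldl (fun b e => if pvBetter e b then e else b) p0 with hz
  have hzmem : z ∈ p0 :: rest := by rw [← heq]; simp
  have hs0mem : s0 ∈ p0 :: rest := hperm.subset (by simp)
  have h1 : pvLe z s0 := hd2 s0 hs0mem
  have h2 : pvLe s0 z := by
    have hzS : z ∈ s0 :: S' := hperm.mem_iff.mpr hzmem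
    rcases List.mem_cons.mp hzS with he | hz'
    · rw [he]; exact pvLe_refl s0
    · exact List.rel_of_pairwise_cons hpw hz'
  have hsame : pvSame z s0 := by
    rcases h1 with hb | hs
    · rcases h2 with hb2 | hs2
      · have hzz := bLT_of_bLT_le hb (pvLe_of_bLT hb2)
        rw [bLT_irrefl] at hzz; simp at hzz
      · exact absurd (pvSame_symm hs2) (not_same_of_bLT hb)
    · exact hs
  have hq1f : ∀ w ∈ q1, pclB s0 w = false := by
    intro w hw
    cases hpc : pclB s0 w
    · rfl
    · exfalso
      have hws0 : pvSame w s0 := (pclB_iff s0 w).mp hpc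
      have hwz : pvSame z w := pvSame_symm (pvSame_trans hws0 (pvSame_symm hsame))
      exact (not_same_of_bLT (hd1 w hw)) hwz
  have hfpool : (p0 :: rest).filter (pclB s0) = z :: q2.filter (pclB s0) := by
    rw [← heq, List.filter_append, List.filter_eq_nil_iff.mpr (fun w hw => by simp [hq1f w hw]),
      List.nil_append, List.filter_cons, if_pos (by simpa using (pclB_iff s0 z).mpr hsame)]
  have hfS : (s0 :: S').filter (pclB s0) = s0 :: S'.filter (pclB s0) := by
    rw [List.filter_cons, if_pos (by simpa using (pclB_iff s0 s0).mpr (pvSame_refl s0))]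
  have hzs0 : s0 = z := by
    have := hfil s0
    rw [hfS, hfpool] at this
    exact (List.cons_eq_cons.mp this).1
  exact ⟨q1, q2, by rw [← heq, ← hzs0], fun w hw => hzs0 ▸ hd1 w hw, by rw [hstep0]; exact hzs0.symm⟩

lemma eraseIdx_mid (u : List (Char × Int)) (v : Char × Int) (w : List (Char × Int)) :
    (u ++ v :: w).eraseIdx u.length = u ++ w := by
  induction u with
  | nil => simp
  | cons x u' ih => simpa [List.eraseIdx] using ih

lemma select_spec (k : Nat) (S pool : List (Char × Int)) (hperm : S.Perm pool)
    (hpw : S.Pairwise pvLe) (hfil : ∀ z, S.filter (pclB z) = pool.filter (pclB z))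
    (hk : k ≤ S.length) :
    pvSelect pool k = some ((S.take k).map Prod.fst) := by
  induction k generalizing S pool with
  | zero => simp [pvSelect]
  | succ k ih =>
    obtain ⟨s0, S', rfl⟩ : ∃ s0 S', S = s0 :: S' := by
      cases S with
      | nil => simp at hk
      | cons s0 S' => exact ⟨s0, S', rfl⟩
    obtain ⟨p0, rest, rfl⟩ : ∃ p0 rest, pool = p0 :: rest := by
      cases pool with
      | nil => have := hperm.length_eq; simp at this
      | cons p0 rest => exact ⟨p0, rest, rfl⟩
    obtain ⟨q1, q2, hdec, hd1, hpick⟩ := pick_eq S' s0 p0 rest hperm hpw hfil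
    have hs0q1 : s0 ∉ q1 := by
      intro hmem
      have := hd1 s0 hmem
      rw [bLT_irrefl] at this; simp at this
    have hremove : PySem.List.remove? (p0 :: rest) s0 = some (q1 ++ q2) := by
      unfold PySem.List.remove?
      have hidx : List.idxOf? s0 (p0 :: rest) = some q1.length := by
        rw [← PySem.List.index?_eq_idxOf?]
        exact (PySem.List.index?_eq_some_iff _ _ _).mpr ⟨q1, q2, hdec, rfl, hs0q1⟩
      rw [hidx, Option.map_some]
      rw [hdec, eraseIdx_mid]
    have hpermS' : S'.Perm (q1 ++ q2) := by
      have h1 : (s0 :: S').Perm (s0 :: (q1 ++ q2)) := by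
        rw [hdec] at hperm
        exact hperm.trans List.perm_middle
      exact h1.cons_inv
    have hfilS' : ∀ z, S'.filter (pclB z) = (q1 ++ q2).filter (pclB z) := by
      intro z
      have hq1f : pclB z s0 = true → ∀ w ∈ q1, pclB z w = false := by
        intro hzs0 w hw
        cases hpc : pclB z w
        · rfl
        · exfalso
          have h1 : pvSame w z := (pclB_iff z w).mp hpc
          have h2 : pvSame s0 z := (pclB_iff z s0).mp hzs0
          exact (not_same_of_bLT (hd1 w hw)) (pvSame_trans h2 (pvSame_symm h1))
      have hfz := hfil z
      rw [hdec] at hfz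
      cases hzs0 : pclB z s0 with
      | true =>
        have hfq1 : List.filter (pclB z) q1 = [] :=
          List.filter_eq_nil_iff.mpr (fun w hw => by simp [hq1f hzs0 w hw])
        rw [List.filter_cons, if_pos (by simp [hzs0]), List.filter_append, List.filter_cons,
          if_pos (by simp [hzs0]), hfq1, List.nil_append] at hfz
        rw [List.filter_append, hfq1, List.nil_append]
        exact (List.cons_eq_cons.mp hfz).2
      | false =>
        rw [List.filter_cons, if_neg (by simp [hzs0]), List.filter_append, List.filter_cons,
          if_neg (by simp [hzs0])] at hfz
        rw [List.filter_append]
        exact hfz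
    have hrec := ih S' (q1 ++ q2) hpermS' (List.Pairwise.of_cons hpw) hfilS' (by
      simp at hk ⊢; omega)
    show (match PySem.List.remove? (p0 :: rest)
        ((p0 :: rest).foldl (fun b e => if pvBetter e b then e else b) p0) with
      | some pool' => (pvSelect pool' k).map
          (fun cs => ((p0 :: rest).foldl (fun b e => if pvBetter e b then e else b) p0).1 :: cs)
      | none => none) = _
    rw [hpick, hremove]
    show (pvSelect (q1 ++ q2) k).map (fun cs => s0.1 :: cs) = _
    rw [hrec]
    simp

-- ---- A's five-element build loop ----

lemma buildA (L : List (Char × Int)) (h5 : 5 ≤ L.length) :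
    (PySem.List.pyRange 0 5 1).foldl
      (fun (acc : Option (List Char)) i =>
        match acc, PySem.List.pyGet? L i with
        | some cs, some p => some (cs ++ [p.1])
        | _, _ => none) (some ['['])
    = some ('[' :: (L.take 5).map Prod.fst) := by
  obtain ⟨a1, L1, rfl⟩ : ∃ x xs, L = x :: xs := by
    cases L with
    | nil => simp at h5
    | cons x xs => exact ⟨x, xs, rfl⟩
  obtain ⟨a2, L2, rfl⟩ : ∃ x xs, L1 = x :: xs := by
    cases L1 with
    | nil => simp at h5
    | cons x xs => exact ⟨x, xs, rfl⟩
  obtain ⟨a3, L3, rfl⟩ : ∃ x xs, L2 = x :: xs := by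
    cases L2 with
    | nil => simp at h5
    | cons x xs => exact ⟨x, xs, rfl⟩
  obtain ⟨a4, L4, rfl⟩ : ∃ x xs, L3 = x :: xs := by
    cases L3 with
    | nil => simp at h5
    | cons x xs => exact ⟨x, xs, rfl⟩
  obtain ⟨a5, L5, rfl⟩ : ∃ x xs, L4 = x :: xs := by
    cases L4 with
    | nil => simp at h5
    | cons x xs => exact ⟨x, xs, rfl⟩
  rw [show PySem.List.pyRange 0 5 1 = [0, 1, 2, 3, 4] from by decide]
  simp only [List.foldl_cons, List.foldl_nil]
  have g0 : PySem.List.pyGet? (a1 :: a2 :: a3 :: a4 :: a5 :: L5) 0 = some a1 := by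
    rw [show (0 : Int) = ((0 : Nat) : Int) by norm_num, PySem.List.pyGet?_natCast]; rfl
  have g1 : PySem.List.pyGet? (a1 :: a2 :: a3 :: a4 :: a5 :: L5) 1 = some a2 := by
    rw [show (1 : Int) = ((1 : Nat) : Int) by norm_num, PySem.List.pyGet?_natCast]; rfl
  have g2 : PySem.List.pyGet? (a1 :: a2 :: a3 :: a4 :: a5 :: L5) 2 = some a3 := by
    rw [show (2 : Int) = ((2 : Nat) : Int) by norm_num, PySem.List.pyGet?_natCast]; rfl
  have g3 : PySem.List.pyGet? (a1 :: a2 :: a3 :: a4 :: a5 :: L5) 3 = some a4 := by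
    rw [show (3 : Int) = ((3 : Nat) : Int) by norm_num, PySem.List.pyGet?_natCast]; rfl
  have g4 : PySem.List.pyGet? (a1 :: a2 :: a3 :: a4 :: a5 :: L5) 4 = some a5 := by
    rw [show (4 : Int) = ((4 : Nat) : Int) by norm_num, PySem.List.pyGet?_natCast]; rfl
  rw [g0, g1, g2, g3, g4]
  simp [List.take]

-- ---- counting: A's dict loop equals B's dict loop ----

lemma contar_eq (cs : List Char) :
    pvContar cs = cs.foldl (fun d c =>
      if c == '-' then d else d.insert c (d.getD c 0 + 1)) PySem.Dict.empty := by
  unfold pvContar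
  have hstep : (fun (d : PySem.Dict Char Int) c =>
      if c == '-' then d
      else
        let d1 := if d.contains c then d else d.insert c (0 : Int)
        d1.modify c 0 (· + 1))
      = (fun (d : PySem.Dict Char Int) c =>
        if c == '-' then d else d.insert c (d.getD c 0 + 1)) := by
    funext d c
    by_cases h : (c == '-') = true
    · simp [h]
    · have h' : (c == '-') = false := by simpa using h
      simp only [h', Bool.false_eq_true, if_false]
      by_cases h2 : d.contains c = true
      · simp only [h2, if_true]
        rfl
      · have h2' : d.contains c = false := by simpa using h2
        simp only [h2', Bool.false_eq_true, if_false]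
        show (d.insert c 0).insert c ((d.insert c 0).getD c 0 + 1) = _
        rw [PySem.Dict.getD_insert_self, PySem.Dict.insert_insert_self,
          PySem.Dict.getD_of_not_contains d 0 h2']
  rw [hstep]

lemma pool_keys (cs : List Char) :
    ((cs.foldl (fun d c =>
      if c == '-' then d else d.insert c (d.getD c 0 + 1)) (PySem.Dict.empty : PySem.Dict Char Int)).items.map Prod.fst)
    = PySem.Set.ofList (cs.filter (fun c => c != '-')) := by
  have hfun : (fun (d : PySem.Dict Char Int) c =>
      if c == '-' then d else d.insert c (d.getD c 0 + 1))
      = (fun (d : PySem.Dict Char Int) c =>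
        if (c != '-') = true then d.insert c (d.getD c 0 + 1) else d) := by
    funext d c
    by_cases h : (c == '-') = true
    · have h2 : (c != '-') = false := by simp [bne, h]
      rw [if_pos h, if_neg (by simp [h2])]
    · have h' : (c == '-') = false := by simpa using h
      have h2 : (c != '-') = true := by simp [bne, h']
      rw [if_neg (by simp [h']), if_pos h2]
  simp only [hfun]
  rw [PySem.List.foldl_if_eq_foldl_filter]
  show ((cs.filter (fun c => c != '-')).foldl
      (fun (d : PySem.Dict Char Int) c => d.insert c (d.getD c 0 + 1)) PySem.Dict.empty).keys = _
  rw [PySem.Dict.keys_foldl_insert]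
  show PySem.Set.update PySem.Dict.empty.keys _ = _
  rw [PySem.Dict.keys_empty, PySem.Set.update_nil_left]

lemma pool_nodup (cs : List Char) :
    ((cs.foldl (fun d c =>
      if c == '-' then d else d.insert c (d.getD c 0 + 1)) (PySem.Dict.empty : PySem.Dict Char Int)).items.map Prod.fst).Nodup := by
  rw [pool_keys]
  exact PySem.Set.nodup_ofList _

-- ===== VERDICT (by name: the statement is the Claim_ definition above) =====
theorem validar_cifra_spec : Claim_equal_validar_cifra := by
  intro cifra sc hdom hpre
  unfold Spec_validar_cifra
  show validar_cifra cifra sc = _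
  unfold validar_cifra validar_cifra_alt
  rw [contar_eq]
  set d : PySem.Dict Char Int := cifra.toList.foldl (fun d c =>
      if c == '-' then d else d.insert c (d.getD c 0 + 1)) PySem.Dict.empty with hd
  set pool := d.items with hpool
  have hnd : (pool.map Prod.fst).Nodup := pool_nodup cifra.toList
  have hlen : 5 ≤ pool.length := by
    have h1 := pool_keys cifra.toList
    unfold Pre_validar_cifra at hpre
    have h2 : pool.length = (pool.map Prod.fst).length := by simp
    rw [h2]
    rw [hpool, hd, h1]
    exact hpre
  obtain ⟨hSperm, hSpw, hSfil⟩ := sort_result pool hnd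
  set S := pvSortOcorrencias pool with hS
  have hSlen : 5 ≤ S.length := by rw [hSperm.length_eq]; exact hlen
  have hfilcl : ∀ z, S.filter (pclB z) = pool.filter (pclB z) := by
    intro z
    apply hSfil
    intro x y hxy hc
    obtain ⟨hx, hy⟩ := hc
    have h1 : pvSame x z := (pclB_iff z x).mp hx
    have h2 : pvSame y z := (pclB_iff z y).mp hy
    exact (not_same_of_bLT hxy) (pvSame_trans h2 (pvSame_symm h1))
  have hsel := select_spec 5 S pool hSperm hSpw hfilcl hSlen
  show (match (PySem.List.pyRange 0 5 1).foldl
      (fun (acc : Option (List Char)) i =>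
        match acc, PySem.List.pyGet? S i with
        | some cs, some p => some (cs ++ [p.1])
        | _, _ => none) (some ['[']) with
    | some cs => decide (cs ++ [']'] = sc.toList)
    | none => false)
    = (match pvSelect pool 5 with
    | some cs => decide (('[' :: cs) ++ [']'] = sc.toList)
    | none => false)
  rw [hsel, buildA S hSlen]
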